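-- pv_equiv track=rewrite | github.com/yusufjuramirza/Scraper | text_scraper_util.py | split_by_paragraph
-- ===== SOURCE A (Python) =====
-- def split_by_paragraph(article_text):
--     valid_endings = ['!', '?', '."', '.', ".'"]
--     sentences = []
--
--     prev = []
--     for line in article_text.splitlines():
--         line = line.strip()
--         if line.endswith(tuple(valid_endings)):
--             sentences.append(''.join(prev) + line)
--             prev = []
--         else:
--             prev.append(line + " ")
--
--     if prev:
--         sentences.append(''.join(prev))
--
--     return sentences
-- ===== SOURCE B (Python) =====
-- def split_by_paragraph(article_text):
--     endings = ('!', '?', '."', '.', ".'")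
--     # Build the result back-to-front: scan lines right-to-left; a terminator
--     # line starts a new sentence at the front, anything else merges into the
--     # current front sentence (or opens the trailing leftover group).
--     out = []
--     for line in reversed(article_text.splitlines()):
--         line = line.strip()
--         if line.endswith(endings):
--             out.append(line)
--         elif out:
--             out[-1] = line + " " + out[-1]
--         else:
--             out.append(line + " ")
--     out.reverse()
--     return out
-- ===== Notes on version B (the rewrite author's own statement) =====
-- stated objective: alternative
-- what changed: Replaces A's forward accumulate-and-flush (a prev buffer joined and emitted at each terminator, plus a final flush) with a single right-to-left pass that builds the sentence list back-to-front: a terminator line starts a new front sentence, any other line merges into the current front sentence, so no buffer and no flush step exist.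
import Mathlib
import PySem

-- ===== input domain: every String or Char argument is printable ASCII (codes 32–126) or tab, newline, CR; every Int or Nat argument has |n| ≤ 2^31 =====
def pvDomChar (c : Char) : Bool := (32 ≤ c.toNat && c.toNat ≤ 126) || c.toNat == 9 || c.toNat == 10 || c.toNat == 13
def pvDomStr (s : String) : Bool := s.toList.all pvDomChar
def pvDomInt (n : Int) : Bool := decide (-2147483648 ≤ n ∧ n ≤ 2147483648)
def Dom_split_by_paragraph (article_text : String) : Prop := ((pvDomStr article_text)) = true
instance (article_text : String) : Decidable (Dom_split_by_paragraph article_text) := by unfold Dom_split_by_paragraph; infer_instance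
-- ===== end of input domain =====

-- B builds the sentence list back-to-front in one reverse pass (merge-at-head),
-- replacing A's forward accumulate-and-flush buffer; objective: alternative.

-- ===== PORT A =====
-- line.endswith(('!', '?', '."', '.', ".'")) — shared by both ports
def pvIsEnd (line : String) : Bool :=
  PySem.Str.endswith line "!" || PySem.Str.endswith line "?" ||
  PySem.Str.endswith line ".\"" || PySem.Str.endswith line "." ||
  PySem.Str.endswith line ".'"

def pvStepA (st : List String × List String) (line : String) : List String × List String :=
  let line := PySem.Str.strip line
  if pvIsEnd line then (st.1 ++ [String.join st.2 ++ line], [])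
  else (st.1, st.2 ++ [line ++ " "])

def split_by_paragraph (article_text : String) : List String :=
  let st := (PySem.Str.splitlines article_text).foldl pvStepA ([], [])
  if st.2.isEmpty then st.1 else st.1 ++ [String.join st.2]

-- ===== PORT B =====
-- Source B keeps the reversed list `out` and appends / edits out[-1]; the port keeps
-- the SAME list in final order, so out.append ↦ cons, out[-1] ↦ head, and the
-- final out.reverse() is absorbed by the representation.
def pvStepB (out : List String) (line : String) : List String :=
  let line := PySem.Str.strip line
  if pvIsEnd line then line :: out
  else match out with
    | h :: t => (line ++ " " ++ h) :: t
    | [] => [line ++ " "]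

def split_by_paragraph_alt (article_text : String) : List String :=
  (PySem.Str.splitlines article_text).reverse.foldl pvStepB []

-- ===== PRECONDITION & SPEC =====
def Spec_split_by_paragraph (article_text : String) (out : List String) : Prop := out = split_by_paragraph_alt article_text
instance (article_text : String) (out : List String) : Decidable (Spec_split_by_paragraph article_text out) := by unfold Spec_split_by_paragraph; infer_instance

-- ===== CLAIM (what is proved, stated in full; the proofs are below) =====
def Claim_equal_split_by_paragraph : Prop := ∀ (article_text : String), Dom_split_by_paragraph article_text → Spec_split_by_paragraph article_text (split_by_paragraph article_text)

-- ===== LEMMAS AND PROOFS =====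

-- prepend the pending buffer `prev` onto the head sentence of `r`
def pvAttach (prev : List String) (r : List String) : List String :=
  match r with
  | [] => if prev.isEmpty then [] else [String.join prev]
  | h :: t => (String.join prev ++ h) :: t

theorem pvJoin_snoc (l : List String) (s : String) :
    String.join (l ++ [s]) = String.join l ++ s := by
  simp [String.join, List.foldl_append]

theorem pvAttach_nil (r : List String) : pvAttach [] r = r := by
  cases r <;> simp [pvAttach, String.join]

theorem pvAttach_snoc (prev : List String) (s : String) (r : List String) :
    pvAttach (prev ++ [s]) r
      = pvAttach prev (match r with | [] => [s] | h :: t => (s ++ h) :: t) := by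
  cases r <;> simp [pvAttach, pvJoin_snoc, String.append_assoc]

def pvFinish (st : List String × List String) : List String :=
  if st.2.isEmpty then st.1 else st.1 ++ [String.join st.2]

theorem pvMain (ls : List String) : ∀ (acc prev : List String),
    pvFinish (ls.foldl pvStepA (acc, prev))
      = acc ++ pvAttach prev (ls.foldr (fun line out => pvStepB out line) []) := by
  induction ls with
  | nil =>
    intro acc prev
    cases prev <;> simp [pvAttach, pvFinish]
  | cons l ls ih =>
    intro acc prev
    simp only [List.foldl_cons, List.foldr_cons]
    by_cases h : pvIsEnd (PySem.Str.strip l) = true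
    · rw [show pvStepA (acc, prev) l
          = (acc ++ [String.join prev ++ PySem.Str.strip l], []) by
        simp [pvStepA, h]]
      rw [ih, pvAttach_nil]
      simp [pvStepB, h, pvAttach]
    · rw [show pvStepA (acc, prev) l
          = (acc, prev ++ [PySem.Str.strip l ++ " "]) by
        simp [pvStepA, h]]
      rw [ih, pvAttach_snoc]
      rcases hr : ls.foldr (fun line out => pvStepB out line) [] with _ | ⟨hd, tl⟩ <;>
        simp [pvStepB, h, String.append_assoc]

-- ===== VERDICT (by name: the statement is the Claim_ definition above) =====
theorem split_by_paragraph_spec : Claim_equal_split_by_paragraph := by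
  intro article_text _
  unfold Spec_split_by_paragraph split_by_paragraph split_by_paragraph_alt
  rw [List.foldl_reverse]
  have h := pvMain (PySem.Str.splitlines article_text) [] []
  rw [pvAttach_nil] at h
  simpa [pvFinish] using h
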